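-- pv_equiv track=rewrite | github.com/HassanRaja00/cse-354-NLP | a3_raja_112249751.py | extractTrigramCounts
-- ===== SOURCE A (Python) =====
-- def extractTrigramCounts(data, vocab):
--     trigramCounts = {}
--     for sentence in data:
--         for i in range(len(sentence)-2):
--             w1, w2, w3 = sentence[i], sentence[i+1], sentence[i+2]  #CHECK IF TUPLE EXISTS
--             key = None
--
--             if w1 not in vocab and w2 not in vocab:
--                 key = ("<OOV>", "<OOV>")
--             elif w1 in vocab and w2 not in vocab:
--                 key = (w1, "<OOV>")
--             elif w1 not in vocab and w2 in vocab:
--                 key = ("<OOV>", w2)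
--             else:
--                 key = (w1, w2)
--
--             if key not in trigramCounts:
--                 trigramCounts[key] = {}
--             if w3 not in vocab:
--                 w3 = "<OOV>"
--             if w3 not in trigramCounts[key]:
--                 trigramCounts[key][w3] = 0
--             trigramCounts[key][w3] += 1
--
--     return trigramCounts
-- ===== SOURCE B (Python) =====
-- def extractTrigramCounts(data, vocab):
--     vs = set(vocab)
--     trigrams = []
--     for sentence in data:
--         norm = [w if w in vs else "<OOV>" for w in sentence]
--         trigrams += zip(norm, norm[1:], norm[2:])
--     flat = {}
--     for t in trigrams:
--         flat[t] = flat.get(t, 0) + 1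
--     result = {}
--     for (n1, n2, n3), c in flat.items():
--         result.setdefault((n1, n2), {})[n3] = c
--     return result
-- ===== Notes on version B (the rewrite author's own statement) =====
-- stated objective: alternative
-- what changed: B replaces A's incremental nested-dict construction with three staged passes over different data structures: it materializes the list of vocab-normalized trigrams, counts them in a FLAT dict keyed by the whole trigram, and only then regroups that flat counter into the nested (w1,w2)->{w3:count} shape.
import Mathlib
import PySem

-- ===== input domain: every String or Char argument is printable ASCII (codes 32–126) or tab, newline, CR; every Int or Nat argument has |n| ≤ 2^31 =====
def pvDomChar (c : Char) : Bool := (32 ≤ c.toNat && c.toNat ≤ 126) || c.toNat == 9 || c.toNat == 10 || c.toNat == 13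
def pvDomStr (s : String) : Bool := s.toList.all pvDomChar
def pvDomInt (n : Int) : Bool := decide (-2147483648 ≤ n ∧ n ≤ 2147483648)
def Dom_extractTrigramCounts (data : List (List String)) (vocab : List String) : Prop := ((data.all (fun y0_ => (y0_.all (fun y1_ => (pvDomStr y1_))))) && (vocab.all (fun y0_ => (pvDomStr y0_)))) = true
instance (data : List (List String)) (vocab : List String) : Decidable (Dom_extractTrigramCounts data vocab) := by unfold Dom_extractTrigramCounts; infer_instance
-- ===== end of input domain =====

-- B replaces A's incremental nested-dict construction by three staged passes: materialize the
-- vocab-normalized trigram list, count it in a FLAT dict keyed by the whole trigram, then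
-- regroup the flat counter into the nested shape (objective: alternative algorithm/data structure).

-- ===== PORT A =====
-- All [] index accesses in A are in range (i ranges over range(len(sentence)-2)), and
-- trigramCounts[key] / [w3] accesses follow the inserts that make them present, so they
-- are ported with getD (the default is never read).
def extractTrigramCounts (data : List (List String)) (vocab : List String) : List (String × String × List (String × Int)) :=
  let trigramCounts :=
    data.foldl (fun tc sentence =>
      (PySem.List.pyRange 0 ((sentence.length : Int) - 2) 1).foldl (fun tc i =>
        let w1 := PySem.List.pyGetD sentence i ""
        let w2 := PySem.List.pyGetD sentence (i + 1) ""
        let w3 := PySem.List.pyGetD sentence (i + 2) ""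
        let key : String × String :=
          if !(vocab.contains w1) && !(vocab.contains w2) then ("<OOV>", "<OOV>")
          else if vocab.contains w1 && !(vocab.contains w2) then (w1, "<OOV>")
          else if !(vocab.contains w1) && vocab.contains w2 then ("<OOV>", w2)
          else (w1, w2)
        let tc := if tc.contains key then tc else tc.insert key PySem.Dict.empty
        let w3 := if vocab.contains w3 then w3 else "<OOV>"
        let tc :=
          if (tc.getD key PySem.Dict.empty).contains w3 then tc
          else tc.insert key ((tc.getD key PySem.Dict.empty).insert w3 0)
        tc.insert key ((tc.getD key PySem.Dict.empty).insert w3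
          ((tc.getD key PySem.Dict.empty).getD w3 0 + 1))
      ) tc
    ) (PySem.Dict.empty : PySem.Dict (String × String) (PySem.Dict String Int))
  trigramCounts.items.map (fun p => (p.1.1, p.1.2, p.2.items))

-- ===== PORT B =====
def extractTrigramCounts_alt (data : List (List String)) (vocab : List String) : List (String × String × List (String × Int)) :=
  let vs := PySem.Set.ofList vocab
  let trigrams :=
    data.foldl (fun acc sentence =>
      let norm := sentence.map (fun w => if PySem.Set.contains vs w then w else "<OOV>")
      acc ++ norm.zip ((PySem.List.slice norm (some 1) none).zip (PySem.List.slice norm (some 2) none))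
    ) ([] : List (String × String × String))
  let flat :=
    trigrams.foldl (fun f t => f.insert t (f.getD t 0 + 1))
      (PySem.Dict.empty : PySem.Dict (String × String × String) Int)
  let result :=
    flat.items.foldl (fun res p =>
      let key : String × String := (p.1.1, p.1.2.1)
      let res := res.setdefault key PySem.Dict.empty
      res.insert key ((res.getD key PySem.Dict.empty).insert p.1.2.2 p.2)
    ) (PySem.Dict.empty : PySem.Dict (String × String) (PySem.Dict String Int))
  result.items.map (fun p => (p.1.1, p.1.2, p.2.items))

-- ===== PRECONDITION & SPEC =====
def Spec_extractTrigramCounts (data : List (List String)) (vocab : List String) (out : List (String × String × List (String × Int))) : Prop := out = extractTrigramCounts_alt data vocab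
instance (data : List (List String)) (vocab : List String) (out : List (String × String × List (String × Int))) : Decidable (Spec_extractTrigramCounts data vocab out) := by unfold Spec_extractTrigramCounts; infer_instance

-- ===== CLAIM (what is proved, stated in full; the proofs are below) =====
def Claim_equal_extractTrigramCounts : Prop := ∀ (data : List (List String)) (vocab : List String), Dom_extractTrigramCounts data vocab → Spec_extractTrigramCounts data vocab (extractTrigramCounts data vocab)

-- ===== LEMMAS AND PROOFS =====

-- Abbreviations for the two nesting levels.
def pvKey (t : String × String × String) : String × String := (t.1, t.2.1)

-- 'w if w in vs else "<OOV>"'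
def pvNorm (vs : PySem.Set String) (w : String) : String :=
  if PySem.Set.contains vs w then w else "<OOV>"

-- A's per-trigram loop body, as a function of the raw trigram (definitionally the body in the port).
def pvStepA (vocab : List String) (tc : PySem.Dict (String × String) (PySem.Dict String Int))
    (w : String × String × String) : PySem.Dict (String × String) (PySem.Dict String Int) :=
  let w1 := w.1
  let w2 := w.2.1
  let w3 := w.2.2
  let key : String × String :=
    if !(vocab.contains w1) && !(vocab.contains w2) then ("<OOV>", "<OOV>")
    else if vocab.contains w1 && !(vocab.contains w2) then (w1, "<OOV>")
    else if !(vocab.contains w1) && vocab.contains w2 then ("<OOV>", w2)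
    else (w1, w2)
  let tc := if tc.contains key then tc else tc.insert key PySem.Dict.empty
  let w3 := if vocab.contains w3 then w3 else "<OOV>"
  let tc :=
    if (tc.getD key PySem.Dict.empty).contains w3 then tc
    else tc.insert key ((tc.getD key PySem.Dict.empty).insert w3 0)
  tc.insert key ((tc.getD key PySem.Dict.empty).insert w3
    ((tc.getD key PySem.Dict.empty).getD w3 0 + 1))

-- A's step on an already-normalized trigram: count one occurrence of t into the nested dict.
def pvStepB (tc : PySem.Dict (String × String) (PySem.Dict String Int))
    (t : String × String × String) : PySem.Dict (String × String) (PySem.Dict String Int) :=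
  tc.insert (pvKey t) ((tc.getD (pvKey t) PySem.Dict.empty).insert t.2.2
    ((tc.getD (pvKey t) PySem.Dict.empty).getD t.2.2 0 + 1))

-- B's regrouping loop body (definitionally the body in the port of B).
def pvGStep (res : PySem.Dict (String × String) (PySem.Dict String Int))
    (p : (String × String × String) × Int) : PySem.Dict (String × String) (PySem.Dict String Int) :=
  let key : String × String := (p.1.1, p.1.2.1)
  let res := res.setdefault key PySem.Dict.empty
  res.insert key ((res.getD key PySem.Dict.empty).insert p.1.2.2 p.2)

-- Setting the value at (pvKey t, t.2.2): both loop bodies are of this shape.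
def pvUpd (d : PySem.Dict (String × String) (PySem.Dict String Int))
    (t : String × String × String) (c : Int) : PySem.Dict (String × String) (PySem.Dict String Int) :=
  d.insert (pvKey t) ((d.getD (pvKey t) PySem.Dict.empty).insert t.2.2 c)

-- The list of trigrams of s (what zip(norm, norm[1:], norm[2:]) iterates over).
def pvTrig {α : Type} (s : List α) : List (α × α × α) :=
  s.zip ((s.drop 1).zip (s.drop 2))

lemma pvTrig_cons3 {α : Type} (a b c : α) (v : List α) :
    pvTrig (a :: b :: c :: v) = (a, b, c) :: pvTrig (b :: c :: v) := rfl

lemma pvTrig_map {α β : Type} (f : α → β) (s : List α) :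
    pvTrig (s.map f) = (pvTrig s).map (fun t => (f t.1, f t.2.1, f t.2.2)) := by
  unfold pvTrig
  rw [← List.map_drop, ← List.map_drop, List.zip_map, List.zip_map]
  apply List.map_congr_left
  intro t _
  rfl

lemma pvNorm_ofList (vocab : List String) (w : String) :
    pvNorm (PySem.Set.ofList vocab) w = if vocab.contains w then w else "<OOV>" := by
  simp [pvNorm, PySem.Set.contains, pysem]

-- The Nat form of A's index loop over range(len(s)-2) is the fold over the trigram list.
lemma pvFold_range_trig {D : Type} (f : D → String × String × String → D) :
    ∀ (s : List String) (init : D),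
      (List.range (s.length - 2)).foldl
        (fun d k => f d (s.getD k "", s.getD (k + 1) "", s.getD (k + 2) "")) init
      = (pvTrig s).foldl f init := by
  intro s
  induction s with
  | nil => intro init; simp [pvTrig]
  | cons a t ih =>
    rcases t with _ | ⟨b, t⟩
    · intro init; simp [pvTrig]
    rcases t with _ | ⟨c, v⟩
    · intro init; simp [pvTrig]
    intro init
    have hlen : (a :: b :: c :: v).length - 2 = v.length + 1 := by simp
    rw [hlen, List.range_succ_eq_map, List.foldl_cons, List.foldl_map, pvTrig_cons3,
      List.foldl_cons]
    have hsh : ∀ (j : Nat),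
        ((a :: b :: c :: v).getD (j + 1) "", (a :: b :: c :: v).getD (j + 1 + 1) "",
          (a :: b :: c :: v).getD (j + 1 + 2) "")
        = ((b :: c :: v).getD j "", (b :: c :: v).getD (j + 1) "",
          (b :: c :: v).getD (j + 2) "") := fun _ => rfl
    have hlen2 : v.length = (b :: c :: v).length - 2 := by simp
    calc (List.range v.length).foldl
          (fun d j => f d ((a :: b :: c :: v).getD (j + 1) "",
            (a :: b :: c :: v).getD (j + 1 + 1) "", (a :: b :: c :: v).getD (j + 1 + 2) ""))
          (f init ((a :: b :: c :: v).getD 0 "", (a :: b :: c :: v).getD 1 "",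
            (a :: b :: c :: v).getD 2 ""))
        = (List.range ((b :: c :: v).length - 2)).foldl
          (fun d j => f d ((b :: c :: v).getD j "", (b :: c :: v).getD (j + 1) "",
            (b :: c :: v).getD (j + 2) "")) (f init (a, b, c)) := by
          rw [← hlen2]
          exact PySem.List.foldl_congr_mem _ _ _ _ (fun d j _ => by rw [hsh j])
      _ = (pvTrig (b :: c :: v)).foldl f (f init (a, b, c)) := ih _

-- The Int index loop of port A reduces to the Nat one and hence to the trigram fold.
lemma pvFold_pyRange_trig {D : Type} (f : D → String × String × String → D)
    (s : List String) (init : D) :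
    (PySem.List.pyRange 0 ((s.length : Int) - 2) 1).foldl
      (fun d i => f d (PySem.List.pyGetD s i "", PySem.List.pyGetD s (i + 1) "",
        PySem.List.pyGetD s (i + 2) "")) init
    = (pvTrig s).foldl f init := by
  rw [PySem.List.pyRange_one, List.foldl_map]
  have htn : ((s.length : Int) - 2 - 0).toNat = s.length - 2 := by omega
  rw [htn, ← pvFold_range_trig f s init]
  refine PySem.List.foldl_congr_mem _ _ _ _ (fun d k _ => ?_)
  have e1 : PySem.List.pyGetD s ((k : Nat) : Int) "" = s.getD k "" :=
    PySem.List.pyGetD_natCast s k ""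
  have e2 : PySem.List.pyGetD s (((k : Nat) : Int) + 1) "" = s.getD (k + 1) "" := by
    rw [show ((k : Nat) : Int) + 1 = ((k + 1 : Nat) : Int) by push_cast; ring]
    exact PySem.List.pyGetD_natCast s (k + 1) ""
  have e3 : PySem.List.pyGetD s (((k : Nat) : Int) + 2) "" = s.getD (k + 2) "" := by
    rw [show ((k : Nat) : Int) + 2 = ((k + 2 : Nat) : Int) by push_cast; ring]
    exact PySem.List.pyGetD_natCast s (k + 2) ""
  simp only [zero_add, e1, e2, e3]

-- One trigram step of A is pvStepB on the normalized trigram.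
lemma pvStep_eq (vocab : List String) (tc : PySem.Dict (String × String) (PySem.Dict String Int))
    (w1 w2 w3 : String) :
    pvStepA vocab tc (w1, w2, w3)
      = pvStepB tc (pvNorm (PySem.Set.ofList vocab) w1, pvNorm (PySem.Set.ofList vocab) w2,
          pvNorm (PySem.Set.ofList vocab) w3) := by
  rw [pvNorm_ofList, pvNorm_ofList, pvNorm_ofList]
  unfold pvStepA pvStepB pvKey
  have hkey :
      (if !(vocab.contains w1) && !(vocab.contains w2) then (("<OOV>" : String), ("<OOV>" : String))
       else if vocab.contains w1 && !(vocab.contains w2) then (w1, "<OOV>")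
       else if !(vocab.contains w1) && vocab.contains w2 then ("<OOV>", w2)
       else (w1, w2))
      = ((if vocab.contains w1 then w1 else "<OOV>"), (if vocab.contains w2 then w2 else "<OOV>")) := by
    cases hc1 : vocab.contains w1 <;> cases hc2 : vocab.contains w2 <;> simp
  simp only [hkey]
  set key : String × String :=
    ((if vocab.contains w1 then w1 else "<OOV>"), (if vocab.contains w2 then w2 else "<OOV>")) with hk
  set n3 : String := if vocab.contains w3 then w3 else "<OOV>" with hn3
  -- the "if key not in: insert {}" preamble never changes any getD at key …
  have hgd : (if tc.contains key then tc else tc.insert key PySem.Dict.empty).getD key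
      PySem.Dict.empty = tc.getD key PySem.Dict.empty := by
    cases htc : tc.contains key
    · simp [PySem.Dict.getD_insert_self, PySem.Dict.getD_of_not_contains tc PySem.Dict.empty htc]
    · simp
  have hins : ∀ (X : PySem.Dict String Int),
      (if tc.contains key then tc else tc.insert key PySem.Dict.empty).insert key X
        = tc.insert key X := by
    intro X
    cases htc : tc.contains key
    · simp [PySem.Dict.insert_insert_self]
    · simp
  cases hw : (tc.getD key PySem.Dict.empty).contains n3
  · -- n3 fresh: A inserts 0 then overwrites with getD+1 = 1; pvStepB inserts getD+1 directly
    simp only [hgd, hw, Bool.false_eq_true, ite_false, hins,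
      PySem.Dict.getD_insert_self, PySem.Dict.insert_insert_self,
      PySem.Dict.getD_of_not_contains (tc.getD key PySem.Dict.empty) 0 hw]
  · simp only [hgd, hw, ite_true, hins]

-- Both regrouping/counting bodies are pvUpd.
lemma pvGStep_eq_upd (d : PySem.Dict (String × String) (PySem.Dict String Int))
    (p : (String × String × String) × Int) : pvGStep d p = pvUpd d p.1 p.2 := by
  show (d.setdefault (p.1.1, p.1.2.1) PySem.Dict.empty).insert (p.1.1, p.1.2.1)
      (((d.setdefault (p.1.1, p.1.2.1) PySem.Dict.empty).getD (p.1.1, p.1.2.1)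
        PySem.Dict.empty).insert p.1.2.2 p.2)
    = d.insert (p.1.1, p.1.2.1) ((d.getD (p.1.1, p.1.2.1) PySem.Dict.empty).insert p.1.2.2 p.2)
  have hgd : (d.setdefault (p.1.1, p.1.2.1) PySem.Dict.empty).getD (p.1.1, p.1.2.1)
      PySem.Dict.empty = d.getD (p.1.1, p.1.2.1) PySem.Dict.empty := by
    cases htc : d.contains (p.1.1, p.1.2.1)
    · rw [PySem.Dict.setdefault_of_not_contains d PySem.Dict.empty htc]
      simp [PySem.Dict.getD_insert_self, PySem.Dict.getD_of_not_contains d PySem.Dict.empty htc]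
    · rw [PySem.Dict.setdefault_of_contains d PySem.Dict.empty htc]
  rw [hgd]
  cases htc : d.contains (p.1.1, p.1.2.1)
  · rw [PySem.Dict.setdefault_of_not_contains d PySem.Dict.empty htc,
      PySem.Dict.insert_insert_self]
  · rw [PySem.Dict.setdefault_of_contains d PySem.Dict.empty htc]

lemma pvStepB_eq_upd (d : PySem.Dict (String × String) (PySem.Dict String Int))
    (t : String × String × String) :
    pvStepB d t = pvUpd d t ((d.getD (pvKey t) PySem.Dict.empty).getD t.2.2 0 + 1) := rfl

-- Two in-place inserts at distinct keys commute when the first key is already present.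
lemma pvInsert_comm {κ ν : Type} [BEq κ] [LawfulBEq κ] (d : PySem.Dict κ ν) (k k' : κ) (v v' : ν)
    (hc : d.contains k = true) (hne : k' ≠ k) :
    (d.insert k v).insert k' v' = (d.insert k' v').insert k v := by
  apply PySem.Dict.ext
  have hbne : (k' == k) = false := by simp [hne]
  have hbne' : (k == k') = false := by simp [Ne.symm hne]
  cases hc' : d.contains k'
  · -- k' absent: left appends after the in-place map, right maps after the append
    have h1 : (d.insert k v).contains k' = false := by
      simp [PySem.Dict.contains_insert, hbne, hc']
    have h2 : (d.insert k' v').contains k = true := by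
      rw [PySem.Dict.contains_insert, hc]
      simp
    rw [PySem.Dict.items_insert_of_not_contains _ _ h1,
      PySem.Dict.items_insert_of_contains _ _ hc,
      PySem.Dict.items_insert_of_contains _ _ h2,
      PySem.Dict.items_insert_of_not_contains _ _ hc', List.map_append]
    simp [hbne]
  · -- both present: two in-place maps, pointwise equal
    have h1 : (d.insert k v).contains k' = true := by
      rw [PySem.Dict.contains_insert, hc']
      simp
    have h2 : (d.insert k' v').contains k = true := by
      rw [PySem.Dict.contains_insert, hc]
      simp
    rw [PySem.Dict.items_insert_of_contains _ _ h1,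
      PySem.Dict.items_insert_of_contains _ _ hc,
      PySem.Dict.items_insert_of_contains _ _ h2,
      PySem.Dict.items_insert_of_contains _ _ hc', List.map_map, List.map_map]
    apply List.map_congr_left
    intro p _
    by_cases hp : p.1 = k
    · simp [Function.comp, hp, hbne']
    · by_cases hp' : p.1 = k'
      · simp [Function.comp, hp', hbne]
      · simp [Function.comp, hp, hp']

-- pvUpd at an existing slot commutes with one regroup step for a different trigram.
lemma pvUpd_gstep_comm (d : PySem.Dict (String × String) (PySem.Dict String Int))
    (t : String × String × String) (v : Int) (p : (String × String × String) × Int)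
    (hne : p.1 ≠ t) (hck : d.contains (pvKey t) = true)
    (hcz : (d.getD (pvKey t) PySem.Dict.empty).contains t.2.2 = true) :
    pvGStep (pvUpd d t v) p = pvUpd (pvGStep d p) t v := by
  rw [pvGStep_eq_upd, pvGStep_eq_upd]
  by_cases hk : pvKey p.1 = pvKey t
  · -- same pair, different third word
    have hk' : ((p.1.1, p.1.2.1) : String × String) = (t.1, t.2.1) := hk
    obtain ⟨h1, h2⟩ := Prod.mk.inj hk'
    have hz : p.1.2.2 ≠ t.2.2 := by
      intro h
      apply hne
      exact Prod.ext h1 (Prod.ext h2 h)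
    unfold pvUpd
    rw [hk, PySem.Dict.getD_insert_self, PySem.Dict.insert_insert_self,
      PySem.Dict.getD_insert_self, PySem.Dict.insert_insert_self,
      pvInsert_comm _ _ _ _ _ hcz hz]
  · unfold pvUpd
    rw [PySem.Dict.getD_insert_of_ne _ _ _ hk, PySem.Dict.getD_insert_of_ne _ _ _ (Ne.symm hk),
      pvInsert_comm _ _ _ _ _ hck hk]

-- The slot (pvKey t, t.2.2) stays present through any regroup step.
lemma pvGStep_pres (d : PySem.Dict (String × String) (PySem.Dict String Int))
    (t : String × String × String) (p : (String × String × String) × Int)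
    (hck : d.contains (pvKey t) = true)
    (hcz : (d.getD (pvKey t) PySem.Dict.empty).contains t.2.2 = true) :
    (pvGStep d p).contains (pvKey t) = true ∧
      ((pvGStep d p).getD (pvKey t) PySem.Dict.empty).contains t.2.2 = true := by
  rw [pvGStep_eq_upd]
  unfold pvUpd
  constructor
  · rw [PySem.Dict.contains_insert, hck]
    simp
  · by_cases hk : pvKey t = pvKey p.1
    · rw [hk, PySem.Dict.getD_insert_self, PySem.Dict.contains_insert, ← hk, hcz]
      simp
    · rw [PySem.Dict.getD_insert_of_ne _ _ _ hk]
      exact hcz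

-- pvUpd at an existing slot commutes with a whole regroup fold over other trigrams.
lemma pvUpd_fold_comm (l : List ((String × String × String) × Int))
    (d : PySem.Dict (String × String) (PySem.Dict String Int))
    (t : String × String × String) (v : Int)
    (hl : ∀ p ∈ l, p.1 ≠ t) (hck : d.contains (pvKey t) = true)
    (hcz : (d.getD (pvKey t) PySem.Dict.empty).contains t.2.2 = true) :
    l.foldl pvGStep (pvUpd d t v) = pvUpd (l.foldl pvGStep d) t v := by
  induction l generalizing d with
  | nil => rfl
  | cons p l ih =>
    rw [List.foldl_cons, List.foldl_cons,
      pvUpd_gstep_comm d t v p (hl p (by simp)) hck hcz]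
    obtain ⟨h1, h2⟩ := pvGStep_pres d t p hck hcz
    exact ih (pvGStep d p) (fun q hq => hl q (by simp [hq])) h1 h2

-- Value characterization of the nested counting fold.
lemma pvFold_get? (ts : List (String × String × String)) (a b c : String) :
    ((ts.foldl pvStepB PySem.Dict.empty).getD (a, b) PySem.Dict.empty).get? c
      = if (a, b, c) ∈ ts then some ((ts.count (a, b, c) : Int)) else none := by
  induction ts using List.reverseRecOn with
  | nil => simp [PySem.Dict.getD_empty, PySem.Dict.get?_empty]
  | append_singleton ts t ih =>
    obtain ⟨x, y, z⟩ := t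
    rw [List.foldl_append, List.foldl_cons, List.foldl_nil, pvStepB_eq_upd]
    unfold pvUpd
    have hkey : pvKey (x, y, z) = (x, y) := rfl
    rw [hkey]
    by_cases hk : ((a, b) : String × String) = (x, y)
    · obtain ⟨ha, hb⟩ := Prod.mk.inj hk
      subst ha
      subst hb
      rw [PySem.Dict.getD_insert_self]
      by_cases hc : c = z
      · subst hc
        rw [PySem.Dict.get?_insert_self]
        have hmem : ((a, b, c) : String × String × String) ∈ ts ++ [(a, b, c)] := by simp
        rw [if_pos hmem, PySem.Dict.getD_eq_get?_getD, ih, List.count_append]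
        by_cases hm : ((a, b, c) : String × String × String) ∈ ts
        · rw [if_pos hm]
          push_cast
          simp
        · rw [if_neg hm]
          rw [List.count_eq_zero.mpr hm]
          simp
      · rw [PySem.Dict.get?_insert_of_ne _ _ hc, ih]
        have hne : ((a, b, c) : String × String × String) ≠ (a, b, z) := by
          intro h
          exact hc (congrArg (fun q => q.2.2) h)
        simp [List.count_append, hne, (show ¬z = c from fun h => hc h.symm)]
    · rw [PySem.Dict.getD_insert_of_ne _ _ _ hk, ih]
      have hne : ((a, b, c) : String × String × String) ≠ (x, y, z) := by
        intro h
        apply hk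
        obtain ⟨h1, h2, h3⟩ : a = x ∧ b = y ∧ c = z := by simpa using h
        exact Prod.ext h1 h2
      have hcond : ¬(x = a ∧ y = b ∧ z = c) := by
        rintro ⟨h1, h2, h3⟩
        exact hk (by rw [h1, h2])
      simp [List.count_append, hne, hcond]

-- pvUpd twice at the same slot keeps only the second value.
lemma pvUpd_upd_self (d : PySem.Dict (String × String) (PySem.Dict String Int))
    (t : String × String × String) (c c' : Int) :
    pvUpd (pvUpd d t c) t c' = pvUpd d t c' := by
  unfold pvUpd
  rw [PySem.Dict.getD_insert_self, PySem.Dict.insert_insert_self,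
    PySem.Dict.insert_insert_self]

-- MAIN LEMMA: regrouping the flat trigram counter equals A's incremental nested fold.
lemma pvGroup_counter (ts : List (String × String × String)) :
    (PySem.Dict.counter ts).items.foldl pvGStep PySem.Dict.empty
      = ts.foldl pvStepB PySem.Dict.empty := by
  induction ts using List.reverseRecOn with
  | nil => rfl
  | append_singleton ts t ih =>
    rw [List.foldl_append, List.foldl_cons, List.foldl_nil,
      PySem.Dict.items_counter, PySem.Set.ofList_append_singleton]
    by_cases hm : t ∈ ts
    · -- t already counted: its single dedup entry gets value +1, mid-list
      have hmem : t ∈ PySem.Set.ofList ts := (PySem.Set.mem_ofList ts t).mpr hm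
      rw [PySem.Set.add_of_mem hmem]
      obtain ⟨pre, post, hsplit⟩ := List.append_of_mem hmem
      have hnd : (PySem.Set.ofList ts).Nodup := PySem.Set.nodup_ofList ts
      rw [hsplit] at hnd
      have hpre : t ∉ pre := by
        intro h
        exact (List.disjoint_of_nodup_append hnd) h (by simp)
      have hpost : t ∉ post := by
        have := (List.nodup_append.mp hnd).2.1
        simp at this
        exact this.1
      have hcntpre : ∀ k ∈ pre, (ts ++ [t]).count k = ts.count k := by
        intro k hk
        have : k ≠ t := fun h => hpre (h ▸ hk)
        simp [List.count_append, Ne.symm this]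
      have hcntpost : ∀ k ∈ post, (ts ++ [t]).count k = ts.count k := by
        intro k hk
        have : k ≠ t := fun h => hpost (h ▸ hk)
        simp [List.count_append, Ne.symm this]
      have hcntt : ((ts ++ [t]).count t : Int) = (ts.count t : Int) + 1 := by
        rw [List.count_append]
        push_cast
        simp
      rw [hsplit, List.map_append, List.map_cons, List.foldl_append, List.foldl_cons]
      -- replace new counts by old counts on pre and post
      have hpreeq : pre.map (fun k => (k, ((ts ++ [t]).count k : Int)))
          = pre.map (fun k => (k, (ts.count k : Int))) := by
        apply List.map_congr_left
        intro k hk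
        rw [hcntpre k hk]
      have hposteq : post.map (fun k => (k, ((ts ++ [t]).count k : Int)))
          = post.map (fun k => (k, (ts.count k : Int))) := by
        apply List.map_congr_left
        intro k hk
        rw [hcntpost k hk]
      rw [hpreeq, hposteq, hcntt]
      set P := (pre.map (fun k => (k, (ts.count k : Int)))).foldl pvGStep PySem.Dict.empty with hP
      -- old-group value: fold over the same list with the old count at t
      have hold : (PySem.Dict.counter ts).items.foldl pvGStep PySem.Dict.empty
          = (post.map (fun k => (k, (ts.count k : Int)))).foldl pvGStep
              (pvGStep P (t, (ts.count t : Int))) := by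
        rw [PySem.Dict.items_counter, hsplit, List.map_append, List.map_cons,
          List.foldl_append, List.foldl_cons]
      -- current-slot facts for the commuting lemma
      have hD := pvGStep_eq_upd P (t, (ts.count t : Int))
      have hck : (pvGStep P (t, (ts.count t : Int))).contains (pvKey t) = true := by
        rw [hD]
        unfold pvUpd
        exact PySem.Dict.contains_insert_self _ _ _
      have hcz : ((pvGStep P (t, (ts.count t : Int))).getD (pvKey t)
          PySem.Dict.empty).contains t.2.2 = true := by
        rw [hD]
        unfold pvUpd
        rw [PySem.Dict.getD_insert_self]
        exact PySem.Dict.contains_insert_self _ _ _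
      have hstep1 : pvGStep P (t, (ts.count t : Int) + 1)
          = pvUpd (pvGStep P (t, (ts.count t : Int))) t ((ts.count t : Int) + 1) := by
        rw [hD, pvGStep_eq_upd, pvUpd_upd_self]
      rw [hstep1, pvUpd_fold_comm _ _ _ _ (fun p hp => by
          obtain ⟨k, hk, hkeq⟩ := List.mem_map.mp hp
          intro h
          apply hpost
          have hk1 : k = p.1 := by rw [← hkeq]
          rw [← h, ← hk1]
          exact hk) hck hcz, ← hold, ih, pvStepB_eq_upd]
      congr 1
      have hch := pvFold_get? ts t.1 t.2.1 t.2.2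
      have hmem' : (t.1, t.2.1, t.2.2) ∈ ts := by
        simpa using hm
      rw [if_pos hmem'] at hch
      have hkey : ((t.1, t.2.1) : String × String) = pvKey t := rfl
      have ht3 : ((t.1, t.2.1, t.2.2) : String × String × String) = t := rfl
      rw [hkey, ht3] at hch
      rw [PySem.Dict.getD_eq_get?_getD
        ((List.foldl pvStepB PySem.Dict.empty ts).getD (pvKey t) PySem.Dict.empty) t.2.2 0, hch]
      simp
    · -- t fresh: the dedup list grows by one entry with count 1 at the end
      have hmem : t ∉ PySem.Set.ofList ts := fun h => hm ((PySem.Set.mem_ofList ts t).mp h)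
      rw [PySem.Set.add_of_not_mem hmem, List.map_append, List.map_cons, List.map_nil,
        List.foldl_append, List.foldl_cons, List.foldl_nil]
      have hcnt1 : ((ts ++ [t]).count t : Int) = 1 := by
        rw [List.count_append, List.count_eq_zero.mpr hm]
        simp
      have heqmap : (PySem.Set.ofList ts).map (fun k => (k, ((ts ++ [t]).count k : Int)))
          = (PySem.Set.ofList ts).map (fun k => (k, (ts.count k : Int))) := by
        apply List.map_congr_left
        intro k hk
        have hkt : k ≠ t := fun h => hm (h ▸ (PySem.Set.mem_ofList ts k).mp hk)
        simp [List.count_append, Ne.symm hkt]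
      rw [hcnt1, heqmap, ← PySem.Dict.items_counter, ih, pvStepB_eq_upd, pvGStep_eq_upd]
      congr 1
      have hch := pvFold_get? ts t.1 t.2.1 t.2.2
      have hmem' : (t.1, t.2.1, t.2.2) ∉ ts := by
        simpa using hm
      rw [if_neg hmem'] at hch
      have hkey : ((t.1, t.2.1) : String × String) = pvKey t := rfl
      rw [hkey] at hch
      rw [PySem.Dict.getD_eq_get?_getD
        ((List.foldl pvStepB PySem.Dict.empty ts).getD (pvKey t) PySem.Dict.empty) t.2.2 0, hch]
      simp

-- foldl over a flatMap is the nested fold.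
lemma pvFoldl_flatMap {α β γ : Type} (l : List α) (f : α → List β) (g : γ → β → γ) (init : γ) :
    (l.flatMap f).foldl g init = l.foldl (fun acc x => (f x).foldl g acc) init := by
  induction l generalizing init with
  | nil => rfl
  | cons a l ih => rw [List.flatMap_cons, List.foldl_append, List.foldl_cons, ih]

-- ===== VERDICT (by name: the statement is the Claim_ definition above) =====
theorem extractTrigramCounts_spec : Claim_equal_extractTrigramCounts := by
  intro data vocab _
  show extractTrigramCounts data vocab = extractTrigramCounts_alt data vocab
  -- both sides as their dict computations
  show (data.foldl (fun (tc : PySem.Dict (String × String) (PySem.Dict String Int)) (sentence : List String) =>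
      (PySem.List.pyRange 0 ((sentence.length : Int) - 2) 1).foldl (fun tc i =>
        pvStepA vocab tc (PySem.List.pyGetD sentence i "", PySem.List.pyGetD sentence (i + 1) "",
          PySem.List.pyGetD sentence (i + 2) "")) tc)
      PySem.Dict.empty).items.map (fun (p : (String × String) × PySem.Dict String Int) => (p.1.1, p.1.2, p.2.items))
    = ((((data.foldl (fun (acc : List (String × String × String)) (sentence : List String) =>
        acc ++ (sentence.map (pvNorm (PySem.Set.ofList vocab))).zip
          ((PySem.List.slice (sentence.map (pvNorm (PySem.Set.ofList vocab))) (some 1) none).zip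
            (PySem.List.slice (sentence.map (pvNorm (PySem.Set.ofList vocab))) (some 2) none))) []
      ).foldl (fun (f : PySem.Dict (String × String × String) Int) (t : String × String × String) => f.insert t (f.getD t 0 + 1)) PySem.Dict.empty).items.foldl pvGStep
        PySem.Dict.empty).items.map (fun (p : (String × String) × PySem.Dict String Int) => (p.1.1, p.1.2, p.2.items)))
  congr 1
  -- B's trigram list is the flatMap of normalized trigram lists
  have htris : (data.foldl (fun acc sentence =>
      acc ++ (sentence.map (pvNorm (PySem.Set.ofList vocab))).zip
        ((PySem.List.slice (sentence.map (pvNorm (PySem.Set.ofList vocab))) (some 1) none).zip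
          (PySem.List.slice (sentence.map (pvNorm (PySem.Set.ofList vocab))) (some 2) none))) [])
      = data.flatMap (fun s => pvTrig (s.map (pvNorm (PySem.Set.ofList vocab)))) := by
    rw [PySem.List.foldl_append_eq_flatMap]
    rw [List.nil_append]
    apply List.flatMap_congr
    intro s _
    rw [PySem.List.slice_from _ (by norm_num), PySem.List.slice_from _ (by norm_num)]
    rfl
  rw [htris, PySem.Dict.foldl_insert_getD_add_one_eq_counter, pvGroup_counter,
    pvFoldl_flatMap]
  -- A's per-sentence loop is the same nested fold
  refine congrArg PySem.Dict.items ?_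
  refine PySem.List.foldl_congr_mem _ _ _ _ (fun tc s _ => ?_)
  rw [pvFold_pyRange_trig (pvStepA vocab) s tc, pvTrig_map, List.foldl_map]
  exact PySem.List.foldl_congr_mem _ _ _ _
    (fun d (t : String × String × String) _ => pvStep_eq vocab d t.1 t.2.1 t.2.2)
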